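-- pv_equiv track=rewrite | github.com/OussIdma/Le-Maitre-Mot-Refonte-Global | backend/services/exercise_types_sync_service.py | _infer_domaine
-- ===== SOURCE A (Python) =====
-- def _normalize_chapter_code(chapter_code: str) -> str:
--     """Normalise le code de chapitre: upper() + remplacer '-' par '_'."""
--     return chapter_code.upper().replace("-", "_")
--
-- def _infer_domaine(chapter_code: str) -> str:
--     """
--     Infère le domaine depuis le code de chapitre.
--
--     Exemples:
--     - 6E_N10 -> Nombres
--     - 6E_G07 -> Géométrie
--     - 6E_SP01 -> Statistiques et probabilités
--     """
--     normalized = _normalize_chapter_code(chapter_code)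
--
--     # Extraire le préfixe du code (N, G, SP, etc.)
--     parts = normalized.split("_")
--     if len(parts) < 2:
--         return "Géométrie"  # Fallback
--
--     prefix = parts[1][0] if parts[1] else "G"
--
--     # Mapping préfixe -> domaine
--     domaine_map = {
--         "N": "Nombres et calculs",
--         "G": "Espace et géométrie",
--         "GM": "Grandeurs et mesures",
--         "SP": "Statistiques et probabilités",
--         "A": "Algèbre",
--         "F": "Fonctions",
--     }
--
--     # Chercher le préfixe le plus long qui correspond
--     for key in sorted(domaine_map.keys(), key=len, reverse=True):
--         if parts[1].startswith(key):
--             return domaine_map[key]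
--
--     # Fallback par défaut
--     return "Géométrie"
-- ===== SOURCE B (Python) =====
-- def _after_underscore(s):
--     """Return the substring after the first '_' in s, or None if s has no '_'."""
--     for j in range(len(s)):
--         if s[j] == "_":
--             return s[j + 1:]
--     return None
--
-- def _classify(tail):
--     """Classify by the first one or two segment characters (segment ends at the next '_')."""
--     if not tail or tail[0] == "_":
--         return "Géométrie"
--     c1 = tail[0]
--     c2 = tail[1] if len(tail) > 1 and tail[1] != "_" else ""
--     if c1 == "G":
--         return "Grandeurs et mesures" if c2 == "M" else "Espace et géométrie"
--     if c1 == "S":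
--         return "Statistiques et probabilités" if c2 == "P" else "Géométrie"
--     if c1 == "N":
--         return "Nombres et calculs"
--     if c1 == "A":
--         return "Algèbre"
--     if c1 == "F":
--         return "Fonctions"
--     return "Géométrie"
--
-- def _infer_domaine(chapter_code: str) -> str:
--     normalized = chapter_code.upper().replace("-", "_")
--     tail = _after_underscore(normalized)
--     if tail is None:
--         return "Géométrie"
--     return _classify(tail)
-- ===== Notes on version B (the rewrite author's own statement) =====
-- stated objective: alternative
-- what changed: Replaces split plus a sort-keys-by-length-and-startswith scan over a dict by a single scan to the first underscore followed by a character-level decision tree on the next one or two segment characters (no dict, no sort, no split).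
import Mathlib
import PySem

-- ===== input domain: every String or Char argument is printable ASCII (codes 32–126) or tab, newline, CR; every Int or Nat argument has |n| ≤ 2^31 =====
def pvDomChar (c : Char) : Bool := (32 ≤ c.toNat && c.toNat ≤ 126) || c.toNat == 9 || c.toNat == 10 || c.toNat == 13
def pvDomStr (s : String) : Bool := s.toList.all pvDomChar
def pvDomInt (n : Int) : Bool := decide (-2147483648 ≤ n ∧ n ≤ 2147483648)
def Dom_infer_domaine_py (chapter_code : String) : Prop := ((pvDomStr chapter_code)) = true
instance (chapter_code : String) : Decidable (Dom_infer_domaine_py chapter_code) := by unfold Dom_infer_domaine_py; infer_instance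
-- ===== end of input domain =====

-- B replaces A's split + sort-keys-by-length + startswith scan over a dict by a direct scan
-- to the first '_' followed by a character-level decision tree on the next one or two
-- characters — no dict, no sort, no split; return value only, no side effects involved.

-- ===== PORT A =====
def domaine_map_A : PySem.Dict String String := PySem.Dict.ofList
  [("N", "Nombres et calculs"), ("G", "Espace et géométrie"), ("GM", "Grandeurs et mesures"),
   ("SP", "Statistiques et probabilités"), ("A", "Algèbre"), ("F", "Fonctions")]

-- the 'for key in sorted(...): if parts[1].startswith(key): return domaine_map[key]' loop
def inferLoopA (seg : String) : List String → String
  | [] => "Géométrie"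
  | k :: ks =>
    if PySem.Str.startswith seg k then PySem.Dict.getD domaine_map_A k "" else inferLoopA seg ks

def infer_domaine_py (chapter_code : String) : String :=
  let normalized := PySem.Str.replace (PySem.Str.upper chapter_code) "-" "_"
  let parts := (PySem.Str.split? normalized "_").getD []   -- sep "_" ≠ "", so split? is always some
  if parts.length < 2 then "Géométrie"
  else
    let seg := parts.getD 1 ""
    -- A's variable 'prefix' is computed but never used; it cannot raise (guarded), so it is omitted
    inferLoopA seg (PySem.List.sorted domaine_map_A.keys (fun k => PySem.Str.len k) true)

-- ===== PORT B =====
-- _after_underscore: scan for the first '_', return the rest of the string after it (or None)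
def afterUnderscoreB : List Char → Option (List Char)
  | [] => none
  | c :: cs => if c = '_' then some cs else afterUnderscoreB cs

-- _classify: decide from the first one/two characters of the tail (segment ends at next '_')
def classifyB (tail : List Char) : String :=
  match tail with
  | [] => "Géométrie"
  | c1 :: rest =>
    if c1 = '_' then "Géométrie"
    else
      let c2 : Option Char := match rest with
        | [] => none
        | c :: _ => if c = '_' then none else some c
      if c1 = 'G' then (if c2 = some 'M' then "Grandeurs et mesures" else "Espace et géométrie")
      else if c1 = 'S' then (if c2 = some 'P' then "Statistiques et probabilités" else "Géométrie")
      else if c1 = 'N' then "Nombres et calculs"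
      else if c1 = 'A' then "Algèbre"
      else if c1 = 'F' then "Fonctions"
      else "Géométrie"

def infer_domaine_py_alt (chapter_code : String) : String :=
  let normalized := PySem.Str.replace (PySem.Str.upper chapter_code) "-" "_"
  match afterUnderscoreB normalized.toList with
  | none => "Géométrie"
  | some tail => classifyB tail

-- ===== PRECONDITION & SPEC =====
def Spec_infer_domaine_py (chapter_code : String) (out : String) : Prop := out = infer_domaine_py_alt chapter_code
instance (chapter_code : String) (out : String) : Decidable (Spec_infer_domaine_py chapter_code out) := by unfold Spec_infer_domaine_py; infer_instance

-- ===== CLAIM (what is proved, stated in full; the proofs are below) =====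
def Claim_equal_infer_domaine_py : Prop := ∀ (chapter_code : String), Dom_infer_domaine_py chapter_code → Spec_infer_domaine_py chapter_code (infer_domaine_py chapter_code)

-- ===== LEMMAS AND PROOFS =====

-- reference recursion for Python's split on the single-character separator '_'
def pieces (pre : List Char) : List Char → List (List Char)
  | [] => [pre]
  | c :: rest => if c = '_' then pre :: pieces [] rest else pieces (pre ++ [c]) rest

theorem go_step_sep (n : Nat) (rest cur : List Char) (acc : List (List Char)) :
    PySem.Chars.splitOn.go ['_'] (n+1) ('_' :: rest) cur acc
      = PySem.Chars.splitOn.go ['_'] n rest [] (cur.reverse :: acc) := by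
  rw [PySem.Chars.splitOn.go.eq_def]
  simp [List.isPrefixOf]

theorem go_step_ne (n : Nat) (c : Char) (rest cur : List Char) (acc : List (List Char))
    (hc : c ≠ '_') :
    PySem.Chars.splitOn.go ['_'] (n+1) (c :: rest) cur acc
      = PySem.Chars.splitOn.go ['_'] n rest (c :: cur) acc := by
  rw [PySem.Chars.splitOn.go.eq_def]
  simp [List.isPrefixOf]
  intro h; exact absurd h.symm hc

theorem go_nil (n : Nat) (cur : List Char) (acc : List (List Char)) :
    PySem.Chars.splitOn.go ['_'] n [] cur acc = (cur.reverse :: acc).reverse := by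
  cases n <;> (rw [PySem.Chars.splitOn.go.eq_def]; try simp)

theorem go_spec (fuel : Nat) : ∀ (l : List Char) (cur : List Char) (acc : List (List Char)),
    l.length ≤ fuel →
    PySem.Chars.splitOn.go ['_'] fuel l cur acc = acc.reverse ++ pieces cur.reverse l := by
  induction fuel with
  | zero =>
    intro l cur acc h
    have hl : l = [] := by cases l <;> simp_all
    subst hl
    rw [go_nil]; simp [pieces]
  | succ n ih =>
    intro l cur acc h
    cases l with
    | nil => rw [go_nil]; simp [pieces]
    | cons c rest =>
      by_cases hc : c = '_'
      · subst hc
        rw [go_step_sep, ih rest [] (cur.reverse :: acc) (by simpa using h)]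
        simp [pieces]
      · rw [go_step_ne n c rest cur acc hc, ih rest (c :: cur) acc (by simpa using h)]
        simp [pieces, hc]

theorem splitOn_eq_pieces (l : List Char) :
    PySem.Chars.splitOn l ['_'] = pieces [] l := by
  have := go_spec (l.length + 1) l [] [] (by omega)
  simpa [PySem.Chars.splitOn] using this

theorem pieces_spec (l : List Char) : ∀ (pre : List Char),
    pieces pre l = (pre ++ l.takeWhile (fun c => c ≠ '_')) ::
      (match afterUnderscoreB l with
       | none => []
       | some t => pieces [] t) := by
  induction l with
  | nil => intro pre; simp [pieces, afterUnderscoreB]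
  | cons c rest ih =>
    intro pre
    by_cases hc : c = '_'
    · subst hc; simp [pieces, afterUnderscoreB, List.takeWhile]
    · simp only [pieces, if_neg hc, ih (pre ++ [c]), afterUnderscoreB]
      simp [List.takeWhile, hc]

theorem sortedKeysA :
    PySem.List.sorted domaine_map_A.keys (fun k => PySem.Str.len k) true
      = ["GM", "SP", "N", "G", "A", "F"] := by decide

theorem loopA_eval (seg : String) :
    inferLoopA seg ["GM", "SP", "N", "G", "A", "F"] =
      (if ("GM" : String).toList <+: seg.toList then "Grandeurs et mesures"
       else if ("SP" : String).toList <+: seg.toList then "Statistiques et probabilités"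
       else if ("N" : String).toList <+: seg.toList then "Nombres et calculs"
       else if ("G" : String).toList <+: seg.toList then "Espace et géométrie"
       else if ("A" : String).toList <+: seg.toList then "Algèbre"
       else if ("F" : String).toList <+: seg.toList then "Fonctions"
       else "Géométrie") := by
  have hN : PySem.Dict.getD domaine_map_A "N" "" = "Nombres et calculs" := by decide
  have hG : PySem.Dict.getD domaine_map_A "G" "" = "Espace et géométrie" := by decide
  have hGM : PySem.Dict.getD domaine_map_A "GM" "" = "Grandeurs et mesures" := by decide
  have hSP : PySem.Dict.getD domaine_map_A "SP" "" = "Statistiques et probabilités" := by decide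
  have hA : PySem.Dict.getD domaine_map_A "A" "" = "Algèbre" := by decide
  have hF : PySem.Dict.getD domaine_map_A "F" "" = "Fonctions" := by decide
  simp [inferLoopA, hN, hG, hGM, hSP, hA, hF, PySem.Chars.startswith_iff]
  rfl

theorem core (t : List Char) (seg : String)
    (hs : seg.toList = t.takeWhile (fun c => c ≠ '_')) :
    inferLoopA seg ["GM", "SP", "N", "G", "A", "F"] = classifyB t := by
  rw [loopA_eval]
  have kGM : ("GM" : String).toList = ['G', 'M'] := rfl
  have kSP : ("SP" : String).toList = ['S', 'P'] := rfl
  have kN : ("N" : String).toList = ['N'] := rfl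
  have kG : ("G" : String).toList = ['G'] := rfl
  have kA : ("A" : String).toList = ['A'] := rfl
  have kF : ("F" : String).toList = ['F'] := rfl
  rcases t with _ | ⟨c1, t'⟩
  · simp only [List.takeWhile_nil] at hs
    simp [classifyB, hs, kGM, kSP, kN, kG, kA, kF]
  · by_cases h1 : c1 = '_'
    · subst h1
      simp only [List.takeWhile_cons, decide_eq_true_eq] at hs
      simp only [if_neg (by simp : ¬ ('_' : Char) ≠ '_')] at hs
      simp [classifyB, hs, kGM, kSP, kN, kG, kA, kF]
    · -- first segment character survives
      have hw : seg.toList = c1 ::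
          (match t' with
           | [] => ([] : List Char)
           | c2 :: rest => if c2 = '_' then [] else c2 :: rest.takeWhile (fun c => c ≠ '_')) := by
        rcases t' with _ | ⟨c2, rest⟩
        · simpa [List.takeWhile, h1] using hs
        · by_cases h2 : c2 = '_' <;> simpa [List.takeWhile, h1, h2] using hs
      -- the one-or-two significant characters
      rcases t' with _ | ⟨c2, rest⟩
      · -- c2 does not exist
        simp only [hw]
        simp only [classifyB, if_neg h1, kGM, kSP, kN, kG, kA, kF]
        by_cases eG : c1 = 'G'
        · subst eG; simp
        · by_cases eS : c1 = 'S'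
          · subst eS; simp
          · by_cases eN : c1 = 'N'
            · subst eN; simp
            · by_cases eA : c1 = 'A'
              · subst eA; simp
              · by_cases eF : c1 = 'F'
                · subst eF; simp
                · simp [eG, eS, eN, eA, eF, Ne.symm eG, Ne.symm eS, Ne.symm eN,
                    Ne.symm eA, Ne.symm eF]
      · by_cases h2 : c2 = '_'
        · -- segment has exactly one character
          subst h2
          simp only [hw]
          simp only [classifyB, if_neg h1, kGM, kSP, kN, kG, kA, kF]
          by_cases eG : c1 = 'G'
          · subst eG; simp
          · by_cases eS : c1 = 'S'
            · subst eS; simp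
            · by_cases eN : c1 = 'N'
              · subst eN; simp
              · by_cases eA : c1 = 'A'
                · subst eA; simp
                · by_cases eF : c1 = 'F'
                  · subst eF; simp
                  · simp [eG, eS, eN, eA, eF, Ne.symm eG, Ne.symm eS, Ne.symm eN,
                      Ne.symm eA, Ne.symm eF]
        · -- two significant characters c1 c2
          simp only [hw, if_neg h2]
          simp only [classifyB, if_neg h1, kGM, kSP, kN, kG, kA, kF, if_neg h2]
          by_cases eG : c1 = 'G'
          · subst eG
            by_cases eM : c2 = 'M'
            · subst eM; simp
            · simp [eM, Ne.symm eM]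
          · by_cases eS : c1 = 'S'
            · subst eS
              by_cases eP : c2 = 'P'
              · subst eP; simp
              · simp [eP, Ne.symm eP, Ne.symm eG]
            · by_cases eN : c1 = 'N'
              · subst eN; simp
              · by_cases eA : c1 = 'A'
                · subst eA; simp
                · by_cases eF : c1 = 'F'
                  · subst eF; simp
                  · simp [eG, eS, eN, eA, eF, Ne.symm eG, Ne.symm eS, Ne.symm eN,
                      Ne.symm eA, Ne.symm eF]

theorem getD_toList (l : List String) : ∀ (i : Nat),
    (l.getD i "").toList = (l.map String.toList).getD i [] := by
  induction l with
  | nil => intro i; simp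
  | cons a l ih =>
    intro i
    cases i with
    | zero => simp
    | succ n => simp only [List.getD_cons_succ, List.map_cons]; exact ih n

theorem main_core (normalized : String) :
    (if ((PySem.Str.split? normalized "_").getD []).length < 2 then "Géométrie"
     else inferLoopA (((PySem.Str.split? normalized "_").getD []).getD 1 "")
       (PySem.List.sorted domaine_map_A.keys (fun k => PySem.Str.len k) true))
    = (match afterUnderscoreB normalized.toList with
       | none => "Géométrie"
       | some tail => classifyB tail) := by
  have hsplit := PySem.Str.split?_map normalized "_"
  have hsep : ("_" : String).toList = ['_'] := by decide
  rw [hsep] at hsplit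
  have hsome : PySem.Chars.split? normalized.toList ['_']
      = some (PySem.Chars.splitOn normalized.toList ['_']) := by
    simp [PySem.Chars.split?]
  rw [hsome] at hsplit
  obtain ⟨ps, hps, hmap⟩ := Option.map_eq_some_iff.mp hsplit
  rw [hps]
  simp only [Option.getD_some]
  have hpieces : PySem.Chars.splitOn normalized.toList ['_'] = pieces [] normalized.toList :=
    splitOn_eq_pieces _
  have hlen : ps.length = (pieces [] normalized.toList).length := by
    rw [← hpieces, ← hmap]; simp
  cases hu : afterUnderscoreB normalized.toList with
  | none =>
    have h1 : pieces [] normalized.toList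
        = [normalized.toList.takeWhile (fun c => c ≠ '_')] := by
      rw [pieces_spec]; simp [hu]
    have : ps.length < 2 := by rw [hlen, h1]; simp
    simp [this]
  | some t =>
    have h1 : pieces [] normalized.toList
        = (normalized.toList.takeWhile (fun c => c ≠ '_')) :: pieces [] t := by
      rw [pieces_spec]; simp [hu]
    have hlen2 : ¬ ps.length < 2 := by
      rw [hlen, h1]
      cases ht : pieces [] t with
      | nil => rw [pieces_spec] at ht; simp at ht
      | cons a l => simp
    rw [if_neg hlen2, sortedKeysA]
    apply core t
    rw [getD_toList, hmap, hpieces, h1, pieces_spec t []]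
    simp

theorem main_eq (chapter_code : String) :
    infer_domaine_py chapter_code = infer_domaine_py_alt chapter_code := by
  have h := main_core (PySem.Str.replace (PySem.Str.upper chapter_code) "-" "_")
  simpa [infer_domaine_py, infer_domaine_py_alt] using h

-- ===== VERDICT (by name: the statement is the Claim_ definition above) =====
theorem infer_domaine_py_spec : Claim_equal_infer_domaine_py := by
  intro chapter_code _
  unfold Spec_infer_domaine_py
  exact main_eq chapter_code
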